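-- pv_equiv track=rewrite | github.com/wittycodername/Code-Wars-Projects | 6kyu English beggars.py | beggars
-- ===== SOURCE A (Python) =====
-- def beggars(values, n):
--
--
--     if n == 0:
--         ans = []
--
--     else:
--         ans = [0] * n
--         y = len(values)
--         z = int(y/n)
--         t = y%n
--
--         for i in range(0,n):
--             for j in range(0,z):
--                 ans[i] += values[i+j*n]
--
--         for i in range(0,t):
--             ans[i] += values[z*n+i]
--     return ans
-- ===== SOURCE B (Python) =====
-- def beggars(values, n):
--     if n <= 0:
--         return []
--     ans = [0] * n
--     for i, v in enumerate(values):
--         ans[i % n] += v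
--     return ans
-- ===== Notes on version B (the rewrite author's own statement) =====
-- stated objective: idiomatic
-- what changed: Replaces A's column-major nested loops (plus a separate remainder loop with int(y/n)/modulo bookkeeping) by a single flat enumerate pass that adds each value into bucket i % n.
import Mathlib
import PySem

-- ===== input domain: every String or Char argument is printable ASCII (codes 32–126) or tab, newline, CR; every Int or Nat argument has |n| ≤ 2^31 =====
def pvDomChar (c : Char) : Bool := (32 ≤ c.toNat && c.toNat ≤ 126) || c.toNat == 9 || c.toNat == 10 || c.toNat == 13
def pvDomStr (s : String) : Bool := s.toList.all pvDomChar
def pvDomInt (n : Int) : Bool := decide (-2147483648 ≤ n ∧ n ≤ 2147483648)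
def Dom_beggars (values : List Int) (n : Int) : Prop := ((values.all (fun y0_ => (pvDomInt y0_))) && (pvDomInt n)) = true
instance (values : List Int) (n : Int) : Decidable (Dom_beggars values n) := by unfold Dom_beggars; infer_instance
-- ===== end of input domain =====

-- B replaces A's column-major nested loops plus separate remainder loop by one flat
-- enumerate pass adding each value into bucket i % n (idiomatic; same linear cost).

-- ===== PORT A =====
def beggars (values : List Int) (n : Int) : List Int :=
  if n = 0 then []
  else
    let ans : List Int := List.replicate n.toNat 0
    let y : Int := values.length
    let z : Int := PySem.Int.truncdiv y n   -- int(y/n); exact here (|y| < 2^53)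
    let t : Int := PySem.Int.mod y n
    let ans := (PySem.List.pyRange 0 n 1).foldl (fun ans i =>
        (PySem.List.pyRange 0 z 1).foldl (fun ans j =>
          PySem.List.pySetD ans i
            (PySem.List.pyGetD ans i 0 + PySem.List.pyGetD values (i + j * n) 0)) ans) ans
    (PySem.List.pyRange 0 t 1).foldl (fun ans i =>
        PySem.List.pySetD ans i
          (PySem.List.pyGetD ans i 0 + PySem.List.pyGetD values (z * n + i) 0)) ans

-- ===== PORT B =====
def beggars_alt (values : List Int) (n : Int) : List Int :=
  if n ≤ 0 then []
  else
    (PySem.List.enumerate values 0).foldl (fun ans iv =>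
        PySem.List.pySetD ans (PySem.Int.mod iv.1 n)
          (PySem.List.pyGetD ans (PySem.Int.mod iv.1 n) 0 + iv.2))
      (List.replicate n.toNat 0)

-- ===== PRECONDITION & SPEC =====
def Spec_beggars (values : List Int) (n : Int) (out : List Int) : Prop := out = beggars_alt values n
instance (values : List Int) (n : Int) (out : List Int) : Decidable (Spec_beggars values n out) := by unfold Spec_beggars; infer_instance

-- ===== CLAIM (what is proved, stated in full; the proofs are below) =====
def Claim_equal_beggars : Prop := ∀ (values : List Int) (n : Int), Dom_beggars values n → Spec_beggars values n (beggars values n)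

-- ===== LEMMAS AND PROOFS =====

-- per-bucket sum in B's "all indices congruent to k mod N" form
def colSum (values : List Int) (N k : Nat) : Int :=
  (((List.range values.length).filter (fun j => j % N = k)).map (fun j => values.getD j 0)).sum

-- B's core fold, named for the proofs
def Bfold (N : Nat) (values : List Int) : List Int :=
  (PySem.List.enumerate values 0).foldl (fun ans iv =>
      PySem.List.pySetD ans (PySem.Int.mod iv.1 (N : Int))
        (PySem.List.pyGetD ans (PySem.Int.mod iv.1 (N : Int)) 0 + iv.2))
    (List.replicate N 0)

-- collapsing a loop that repeatedly adds into one fixed cell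
lemma foldl_set_add {α : Type} (i : Nat) (L : List α) (c : α → Int) (ans : List Int) :
    L.foldl (fun a x => a.set i (a.getD i 0 + c x)) ans
      = ans.set i (ans.getD i 0 + (L.map c).sum) := by
  induction L generalizing ans with
  | nil =>
    simp only [List.foldl_nil, List.map_nil, List.sum_nil, add_zero]
    by_cases h : i < ans.length
    · rw [List.getD_eq_getElem _ _ h, List.set_getElem_self]
    · rw [List.set_eq_of_length_le (by omega)]
  | cons hd tl ih =>
    simp only [List.foldl_cons, List.map_cons, List.sum_cons, ih]
    by_cases h : i < ans.length
    · rw [List.getD_eq_getElem (ans.set i (ans.getD i 0 + c hd)) 0 (by simpa using h),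
        List.getElem_set_self (by simpa using h), List.set_set, add_assoc]
    · have hle : ans.length ≤ i := by omega
      simp only [List.set_eq_of_length_le hle]

-- an index loop 'for k in range(N): a[k] += g k' as a mapIdx
lemma foldl_range_set (g : Nat → Int) (N : Nat) (ans : List Int) :
    (List.range N).foldl (fun a k => a.set k (a.getD k 0 + g k)) ans
      = ans.mapIdx (fun k v => v + if k < N then g k else 0) := by
  induction N with
  | zero =>
    simp only [List.range_zero, List.foldl_nil, Nat.not_lt_zero, if_false, add_zero]
    apply List.ext_getElem
    · simp
    · intro k hk1 hk2; simp
  | succ N ih =>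
    rw [List.range_succ, List.foldl_append, List.foldl_cons, List.foldl_nil, ih]
    apply List.ext_getElem
    · simp
    · intro k hk1 hk2
      by_cases hkN : k = N
      · subst hkN
        have hklen : k < ans.length := by simpa using hk2
        rw [List.getElem_set_self (by simpa using hklen),
          List.getD_eq_getElem _ _ (by simpa using hklen)]
        simp
      · rw [List.getElem_set_ne (by omega)]
        have hklen : k < ans.length := by simpa using hk2
        simp only [List.getElem_mapIdx]
        by_cases hkNlt : k < N
        · simp [hkNlt, Nat.lt_succ_of_lt hkNlt]
        · have h2 : ¬ k < N + 1 := by omega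
          simp [hkNlt, h2]

-- PySem.List.enumerate distributes over snoc
lemma enumerate_snoc {α : Type} (xs : List α) (x : α) (s : Int) :
    PySem.List.enumerate (xs ++ [x]) s
      = PySem.List.enumerate xs s ++ [(s + xs.length, x)] := by
  induction xs generalizing s with
  | nil => simp [PySem.List.enumerate_nil, PySem.List.enumerate_cons]
  | cons hd tl ih =>
    simp only [List.cons_append, PySem.List.enumerate_cons, ih, List.length_cons]
    push_cast
    ring_nf

-- the snoc step of colSum
lemma colSum_snoc (vs : List Int) (v : Int) (N k : Nat) :
    colSum (vs ++ [v]) N k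
      = colSum vs N k + (if vs.length % N = k then v else 0) := by
  unfold colSum
  simp only [List.length_append, List.length_singleton, List.range_succ, List.filter_append]
  rw [List.map_append, List.sum_append]
  congr 1
  · congr 1
    apply List.map_congr_left
    intro j hj
    have hjy : j < vs.length := by
      have := List.mem_range.mp (List.mem_of_mem_filter hj)
      omega
    rw [List.getD_append _ _ _ _ hjy]
  · by_cases h : vs.length % N = k
    · simp [List.filter, h]
    · simp [List.filter, h]

lemma Bfold_snoc (N : Nat) (vs : List Int) (v : Int) :
    Bfold N (vs ++ [v])
      = (Bfold N vs).set (vs.length % N) ((Bfold N vs).getD (vs.length % N) 0 + v) := by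
  unfold Bfold
  rw [enumerate_snoc, List.foldl_append, List.foldl_cons, List.foldl_nil]
  have hm : PySem.Int.mod ((0 : Int) + (vs.length : Int)) (N : Int)
      = ((vs.length % N : Nat) : Int) := by
    rw [zero_add]; exact PySem.Int.mod_natCast _ _
  rw [hm]
  simp only [PySem.List.pySetD_natCast, PySem.List.pyGetD_natCast]

lemma Bfold_length (N : Nat) (values : List Int) : (Bfold N values).length = N := by
  induction values using List.reverseRecOn with
  | nil => simp [Bfold, PySem.List.enumerate_nil]
  | append_singleton vs v ih => rw [Bfold_snoc]; simpa using ih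

lemma Bfold_getD (N : Nat) (values : List Int) (_hN : 0 < N) :
    ∀ k, k < N → (Bfold N values).getD k 0 = colSum values N k := by
  induction values using List.reverseRecOn with
  | nil =>
    intro k hk
    rw [show Bfold N [] = List.replicate N 0 by simp [Bfold, PySem.List.enumerate_nil]]
    rw [List.getD_eq_getElem _ _ (by simpa using hk)]
    simp [colSum]
  | append_singleton vs v ih =>
    intro k hk
    have hlen : (Bfold N vs).length = N := Bfold_length N vs
    rw [Bfold_snoc, colSum_snoc, ← ih k hk]
    by_cases h : vs.length % N = k
    · rw [h, if_pos rfl]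
      have hkl : k < ((Bfold N vs).set k ((Bfold N vs).getD k 0 + v)).length := by
        simpa [hlen] using hk
      rw [List.getD_eq_getElem _ _ hkl, List.getElem_set_self (by simpa [hlen] using hk)]
    · rw [if_neg h]
      have hkl : k < (Bfold N vs).length := by omega
      have hkl2 : k < ((Bfold N vs).set (vs.length % N)
          ((Bfold N vs).getD (vs.length % N) 0 + v)).length := by simpa using hkl
      rw [List.getD_eq_getElem _ 0 hkl2, List.getElem_set_ne (by omega),
        ← List.getD_eq_getElem _ 0 hkl, add_zero]

lemma B_eq (values : List Int) (N : Nat) (hN : 0 < N) :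
    beggars_alt values (N : Int) = Bfold N values := by
  unfold beggars_alt Bfold
  rw [if_neg (by omega)]
  simp

-- A's per-bucket count-form sum equals B's congruence-form sum
lemma sum_range_cnt (values : List Int) (N k : Nat) (hN : 0 < N) (hk : k < N) (y : Nat) :
    ((List.range (y / N + if k < y % N then 1 else 0)).map
        (fun m => values.getD (k + m * N) 0)).sum
      = (((List.range y).filter (fun j => j % N = k)).map (fun j => values.getD j 0)).sum := by
  induction y with
  | zero => simp
  | succ y ih =>
    have hNy : N * (y / N) + y % N = y := Nat.div_add_mod y N
    have hNy' : y / N * N + y % N = y := by rw [Nat.mul_comm (y / N) N]; exact hNy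
    have hr : y % N < N := Nat.mod_lt _ hN
    rw [List.range_succ, List.filter_append, List.map_append, List.sum_append, ← ih]
    rcases Nat.lt_or_ge (y % N + 1) N with hlt | hge
    · have hdiv : (y + 1) / N = y / N := by
        conv_lhs => rw [← hNy]
        rw [show N * (y / N) + y % N + 1 = N * (y / N) + (y % N + 1) by ring,
          Nat.mul_add_div hN, Nat.div_eq_of_lt hlt, Nat.add_zero]
      have hmod : (y + 1) % N = y % N + 1 := by
        conv_lhs => rw [← hNy]
        rw [show N * (y / N) + y % N + 1 = N * (y / N) + (y % N + 1) by ring,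
          Nat.mul_add_mod, Nat.mod_eq_of_lt hlt]
      rw [hdiv, hmod]
      by_cases hky : y % N = k
      · have h1 : k < y % N + 1 := by omega
        have h2 : ¬ k < y % N := by omega
        rw [if_pos h1, if_neg h2, Nat.add_zero, List.range_succ, List.map_append,
          List.sum_append]
        have hidx : k + y / N * N = y := by omega
        simp [List.filter, hky, hidx]
      · have h3 : (if k < y % N + 1 then 1 else 0) = (if k < y % N then 1 else 0) := by
          by_cases h4 : k < y % N
          · rw [if_pos h4, if_pos (by omega)]
          · rw [if_neg h4, if_neg (by omega)]
        rw [h3]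
        simp [List.filter, hky]
    · have hrN : y % N + 1 = N := by omega
      have hdiv : (y + 1) / N = y / N + 1 := by
        conv_lhs => rw [← hNy]
        rw [show N * (y / N) + y % N + 1 = N * (y / N + 1) by rw [Nat.mul_add]; omega,
          Nat.mul_div_cancel_left _ hN]
      have hmod : (y + 1) % N = 0 := by
        conv_lhs => rw [← hNy]
        rw [show N * (y / N) + y % N + 1 = N * (y / N + 1) by rw [Nat.mul_add]; omega]
        exact Nat.mul_mod_right N _
      rw [hdiv, hmod]
      by_cases hky : y % N = k
      · have h2 : ¬ k < y % N := by omega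
        rw [if_neg (by omega : ¬ k < 0), if_neg h2, Nat.add_zero, Nat.add_zero,
          List.range_succ, List.map_append, List.sum_append]
        have hidx : k + y / N * N = y := by omega
        simp [List.filter, hky, hidx]
      · have h4 : k < y % N := by omega
        rw [if_neg (by omega : ¬ k < 0), if_pos h4, Nat.add_zero]
        simp [List.filter, hky]

-- A for positive n, as two mapIdx layers over the zero list
lemma A_pos (values : List Int) (N : Nat) (hN : 0 < N) :
    beggars values (N : Int)
      = ((List.replicate N (0 : Int)).mapIdx (fun k v => v + if k < N then
            ((List.range (values.length / N)).map
              (fun j => values.getD (k + j * N) 0)).sum else 0)).mapIdx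
          (fun k v => v + if k < values.length % N then
            values.getD (values.length / N * N + k) 0 else 0) := by
  have hne : (N : Int) ≠ 0 := by exact_mod_cast hN.ne'
  have hrange : ∀ m : Nat, PySem.List.pyRange 0 (m : Int) 1
      = (List.range m).map (fun k : Nat => (k : Int)) := by
    intro m
    rw [PySem.List.pyRange_one]
    simp only [sub_zero, Int.toNat_natCast, zero_add]
  have hz : PySem.Int.truncdiv ((values.length : Nat) : Int) (N : Int)
      = ((values.length / N : Nat) : Int) := (Int.ofNat_tdiv _ _).symm
  have ht : PySem.Int.mod ((values.length : Nat) : Int) (N : Int)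
      = ((values.length % N : Nat) : Int) := PySem.Int.mod_natCast _ _
  have hb : ∀ (k : Nat) (a : List Int) (j : Nat),
      PySem.List.pySetD a (k : Int)
          (PySem.List.pyGetD a (k : Int) 0 + PySem.List.pyGetD values ((k : Int) + (j : Int) * (N : Int)) 0)
        = a.set k (a.getD k 0 + values.getD (k + j * N) 0) := by
    intro k a j
    rw [show ((k : Int) + (j : Int) * (N : Int)) = ((k + j * N : Nat) : Int) by push_cast; ring]
    simp only [PySem.List.pySetD_natCast, PySem.List.pyGetD_natCast]
  have hinner : ∀ (ans : List Int) (k : Nat),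
      (List.range (values.length / N)).foldl (fun (a : List Int) (j : Nat) =>
          PySem.List.pySetD a (k : Int)
            (PySem.List.pyGetD a (k : Int) 0 + PySem.List.pyGetD values ((k : Int) + (j : Int) * (N : Int)) 0)) ans
        = ans.set k (ans.getD k 0 +
            ((List.range (values.length / N)).map (fun j => values.getD (k + j * N) 0)).sum) := by
    intro ans k
    simp only [hb k]
    exact foldl_set_add k _ _ ans
  have hrem : ∀ (a : List Int) (k : Nat),
      PySem.List.pySetD a (k : Int)
          (PySem.List.pyGetD a (k : Int) 0 +
            PySem.List.pyGetD values (((values.length / N : Nat) : Int) * (N : Int) + (k : Int)) 0)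
        = a.set k (a.getD k 0 + values.getD (values.length / N * N + k) 0) := by
    intro a k
    rw [show (((values.length / N : Nat) : Int) * (N : Int) + (k : Int))
        = ((values.length / N * N + k : Nat) : Int) by push_cast; ring]
    simp only [PySem.List.pySetD_natCast, PySem.List.pyGetD_natCast]
  simp only [beggars, if_neg hne, hz, ht, Int.toNat_natCast]
  simp only [hrange, List.foldl_map]
  simp only [hinner]
  rw [foldl_range_set]
  simp only [hrem]
  rw [foldl_range_set]

-- ===== VERDICT (by name: the statement is the Claim_ definition above) =====
theorem beggars_spec : Claim_equal_beggars := by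
  intro values n _
  unfold Spec_beggars
  rcases lt_trichotomy n 0 with h | h | h
  · have hA : beggars values n = [] := by
      have hmod := (PySem.Int.mod_neg_bounds (a := (values.length : Int)) h).2
      simp only [beggars, if_neg (by omega : n ≠ 0),
        PySem.List.pyRange_one_eq_nil (le_of_lt h), PySem.List.pyRange_one_eq_nil hmod,
        List.foldl_nil]
      simp [Int.toNat_of_nonpos h.le]
    rw [hA]
    simp [beggars_alt, h.le]
  · subst h
    simp [beggars, beggars_alt]
  · obtain ⟨N, rfl⟩ : ∃ N : Nat, n = (N : Int) := ⟨n.toNat, (Int.toNat_of_nonneg h.le).symm⟩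
    have hN : 0 < N := by exact_mod_cast h
    rw [A_pos values N hN, B_eq values N hN]
    apply List.ext_getElem
    · simp [Bfold_length]
    · intro k hk1 hk2
      have hkN : k < N := by rwa [Bfold_length] at hk2
      have hB : (Bfold N values)[k] = colSum values N k := by
        rw [← List.getD_eq_getElem _ 0 hk2]
        exact Bfold_getD N values hN k hkN
      rw [hB]
      unfold colSum
      rw [← sum_range_cnt values N k hN hkN values.length]
      simp only [List.getElem_mapIdx, List.getElem_replicate]
      rw [if_pos hkN, zero_add]
      by_cases hky : k < values.length % N
      · rw [if_pos hky, if_pos hky, List.range_succ, List.map_append, List.sum_append]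
        rw [show values.length / N * N + k = k + values.length / N * N from Nat.add_comm _ _]
        simp only [List.map_cons, List.map_nil, List.sum_cons, List.sum_nil, add_zero]
      · rw [if_neg hky, if_neg hky, add_zero, Nat.add_zero]
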